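-- pv_equiv track=rewrite | github.com/MysterionRise/adaptive-knowledge-graph | scripts/migrate_to_enterprise.py | group_chunks_by_module
-- ===== SOURCE A (Python) =====
-- def group_chunks_by_module(chunks: list[dict]) -> dict[str, list[dict]]:
--     """Group chunks by module_id for sequential linking."""
--     grouped: dict[str, list[dict]] = {}
--
--     for chunk in chunks:
--         module_id = chunk.get("module_id", "unknown")
--         if module_id not in grouped:
--             grouped[module_id] = []
--         grouped[module_id].append(chunk)
--
--     # Sort chunks within each module by ID (assumes IDs are sequential)
--     for module_id in grouped:
--         grouped[module_id].sort(key=lambda c: c.get("id", ""))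
--
--     return grouped
-- ===== SOURCE B (Python) =====
-- def group_chunks_by_module(chunks: list[dict]) -> dict[str, list[dict]]:
--     """Group chunks by module_id for sequential linking."""
--     modules = dict.fromkeys(c.get("module_id", "unknown") for c in chunks)
--     return {
--         m: sorted(
--             (c for c in chunks if c.get("module_id", "unknown") == m),
--             key=lambda c: c.get("id", ""),
--         )
--         for m in modules
--     }
-- ===== Notes on version B (the rewrite author's own statement) =====
-- stated objective: simpler
-- what changed: A builds the dict incrementally with membership checks and then re-sorts each bucket in a second in-place pass; B is a single dict comprehension over the distinct module ids (dict.fromkeys) mapping each module to the sorted filter of its chunks.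
import Mathlib
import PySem

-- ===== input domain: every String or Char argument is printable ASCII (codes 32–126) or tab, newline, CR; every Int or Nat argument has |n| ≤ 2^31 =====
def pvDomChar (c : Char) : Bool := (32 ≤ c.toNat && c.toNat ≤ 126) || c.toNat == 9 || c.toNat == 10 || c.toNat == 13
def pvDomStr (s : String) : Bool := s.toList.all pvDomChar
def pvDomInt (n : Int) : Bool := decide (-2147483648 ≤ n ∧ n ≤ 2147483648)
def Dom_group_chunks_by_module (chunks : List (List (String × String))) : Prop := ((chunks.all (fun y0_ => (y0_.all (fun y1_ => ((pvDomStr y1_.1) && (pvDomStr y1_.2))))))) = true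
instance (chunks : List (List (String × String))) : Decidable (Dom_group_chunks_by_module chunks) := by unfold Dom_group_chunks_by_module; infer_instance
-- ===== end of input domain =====

-- B replaces A's incremental dict-of-lists plus a second in-place sorting pass by a single
-- comprehension: the distinct module ids in first-occurrence order, each mapped to the
-- sorted filter of its chunks (objective: simpler; not faster).

-- chunk.get("module_id", "unknown") / chunk.get("id", "") — used verbatim by both Pythons
def pvModId (c : List (String × String)) : String :=
  (PySem.Dict.mk c).getD "module_id" "unknown"

def pvIdKey (c : List (String × String)) : String :=
  (PySem.Dict.mk c).getD "id" ""

-- ===== PORT A =====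
def group_chunks_by_module (chunks : List (List (String × String))) : List (String × List (List (String × String))) :=
  -- grouped = {}; for chunk in chunks: …
  let grouped : PySem.Dict String (List (List (String × String))) :=
    chunks.foldl (fun g chunk =>
      let module_id := pvModId chunk
      let g := if g.contains module_id then g else g.insert module_id []
      g.modify module_id [] (fun l => l ++ [chunk])) PySem.Dict.empty
  -- for module_id in grouped: grouped[module_id].sort(key=lambda c: c.get("id", ""))
  let grouped := grouped.keys.foldl (fun g module_id =>
    g.insert module_id (PySem.List.sorted (g.getD module_id []) pvIdKey false)) grouped
  grouped.items

-- ===== PORT B =====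
def group_chunks_by_module_alt (chunks : List (List (String × String))) : List (String × List (List (String × String))) :=
  -- modules = dict.fromkeys(c.get("module_id", "unknown") for c in chunks)
  let modules := PySem.List.dedup (chunks.map pvModId)
  -- {m: sorted((c for c in chunks if …== m), key=…) for m in modules}
  modules.map (fun m =>
    (m, PySem.List.sorted (chunks.filter (fun c => pvModId c == m)) pvIdKey false))

-- ===== PRECONDITION & SPEC =====
def Spec_group_chunks_by_module (chunks : List (List (String × String))) (out : List (String × List (List (String × String)))) : Prop := out = group_chunks_by_module_alt chunks
instance (chunks : List (List (String × String))) (out : List (String × List (List (String × String)))) : Decidable (Spec_group_chunks_by_module chunks out) := by unfold Spec_group_chunks_by_module; infer_instance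

-- ===== CLAIM (what is proved, stated in full; the proofs are below) =====
def Claim_equal_group_chunks_by_module : Prop := ∀ (chunks : List (List (String × String))), Dom_group_chunks_by_module chunks → Spec_group_chunks_by_module chunks (group_chunks_by_module chunks)

-- ===== LEMMAS AND PROOFS =====

-- A's "if absent, insert []; then append" is one modify-with-default step
theorem pv_stepA_eq (g : PySem.Dict String (List (List (String × String))))
    (m : String) (chunk : List (String × String)) :
    (if g.contains m then g else g.insert m []).modify m [] (fun l => l ++ [chunk])
      = g.modify m [] (fun l => l ++ [chunk]) := by
  cases hc : g.contains m with
  | true => simp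
  | false =>
    simp [PySem.Dict.modify, PySem.Dict.insert_insert_self,
      PySem.Dict.getD_insert_self, PySem.Dict.getD_of_not_contains g [] hc]

-- the grouping loop as the canonical modify-append fold over (key, chunk) pairs
theorem pv_phase1_eq (chunks : List (List (String × String))) :
    chunks.foldl (fun g chunk =>
        let module_id := pvModId chunk
        let g := if g.contains module_id then g else g.insert module_id []
        g.modify module_id [] (fun l => l ++ [chunk])) PySem.Dict.empty
      = (chunks.map (fun c => (pvModId c, c))).foldl
          (fun d p => d.modify p.1 [] (fun x => x ++ [p.2])) PySem.Dict.empty := by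
  rw [List.foldl_map]
  simp only [pv_stepA_eq]

theorem pv_grouped_getD (chunks : List (List (String × String))) (m : String) :
    ((chunks.map (fun c => (pvModId c, c))).foldl
        (fun d p => d.modify p.1 [] (fun x => x ++ [p.2])) PySem.Dict.empty).getD m []
      = chunks.filter (fun c => pvModId c == m) := by
  rw [PySem.Dict.getD_foldl_modify_append]
  simp [List.filter_map, Function.comp_def]

theorem pv_grouped_keys (chunks : List (List (String × String))) :
    ((chunks.map (fun c => (pvModId c, c))).foldl
        (fun d p => d.modify p.1 [] (fun x => x ++ [p.2])) PySem.Dict.empty).keys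
      = PySem.Set.ofList (chunks.map pvModId) := by
  rw [List.foldl_map]
  have h := PySem.Dict.keys_foldl_modify_key (ν := List (List (String × String)))
    chunks pvModId [] (fun _ c => fun l => l ++ [c]) PySem.Dict.empty
  simpa [PySem.Set.update_nil_left] using h

theorem pv_grouped_nodup (chunks : List (List (String × String))) :
    ((chunks.map (fun c => (pvModId c, c))).foldl
        (fun d p => d.modify p.1 [] (fun x => x ++ [p.2])) PySem.Dict.empty).keys.Nodup := by
  rw [List.foldl_map]
  exact PySem.Dict.nodup_keys_foldl_modify_key chunks pvModId []
    (fun _ c => fun l => l ++ [c]) PySem.Dict.empty (by simp)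

-- the sorting pass does not touch keys outside the remaining worklist
theorem pv_fold2_get?_stable (f2 : PySem.Dict String (List (List (String × String))) → String → List (List (String × String)))
    (m : String) :
    ∀ (ks : List String) (g : PySem.Dict String (List (List (String × String)))), m ∉ ks →
      (ks.foldl (fun g x => g.insert x (f2 g x)) g).get? m = g.get? m := by
  intro ks
  induction ks with
  | nil => intro g _; rfl
  | cons k t ih =>
    intro g hm
    simp only [List.foldl_cons]
    rw [ih _ (by simp_all), PySem.Dict.get?_insert_of_ne _ _ (by simp_all)]

-- value of the sorting pass at each key of the worklist
theorem pv_fold2_getD (ks : List String) :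
    ks.Nodup → ∀ (g : PySem.Dict String (List (List (String × String)))) (m : String), m ∈ ks →
      (ks.foldl (fun g x => g.insert x (PySem.List.sorted (g.getD x []) pvIdKey false)) g).getD m []
        = PySem.List.sorted (g.getD m []) pvIdKey false := by
  induction ks with
  | nil => intro _ g m hm; simp at hm
  | cons k t ih =>
    intro hnd g m hm
    simp only [List.foldl_cons]
    by_cases hk : m = k
    · subst hk
      have hmt : m ∉ t := (List.nodup_cons.mp hnd).1
      rw [PySem.Dict.getD_eq_get?_getD, pv_fold2_get?_stable _ m t _ hmt,
        ← PySem.Dict.getD_eq_get?_getD, PySem.Dict.getD_insert_self]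
    · have hmt : m ∈ t := by
        rcases List.mem_cons.mp hm with h | h
        · exact absurd h hk
        · exact h
      rw [ih (List.nodup_cons.mp hnd).2 _ m hmt,
        PySem.Dict.getD_insert_of_ne _ _ _ hk]

theorem pv_set_update_self (s : PySem.Set String) : PySem.Set.update s s = s := by
  rw [PySem.Set.update_eq_append_filter]
  have : (PySem.Set.ofList s).filter (fun y => !PySem.Set.contains s y) = [] := by
    rw [List.filter_eq_nil_iff]
    intro y hy
    have hys : y ∈ s := (PySem.Set.mem_ofList _ _).mp hy
    simp [hys]
  rw [this, List.append_nil]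

-- ===== VERDICT (by name: the statement is the Claim_ definition above) =====
theorem group_chunks_by_module_spec : Claim_equal_group_chunks_by_module := by
  intro chunks _
  unfold Spec_group_chunks_by_module group_chunks_by_module group_chunks_by_module_alt
  simp only [pv_phase1_eq]
  set grouped := (chunks.map (fun c => (pvModId c, c))).foldl
      (fun d p => d.modify p.1 [] (fun x => x ++ [p.2])) PySem.Dict.empty with hg
  set r := grouped.keys.foldl
      (fun g module_id => g.insert module_id (PySem.List.sorted (g.getD module_id []) pvIdKey false)) grouped with hr
  have hkeys : r.keys = grouped.keys := by
    rw [hr, PySem.Dict.keys_foldl_insert, pv_set_update_self]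
  have hnd : r.keys.Nodup := by
    rw [hkeys]; exact pv_grouped_nodup chunks
  rw [PySem.Dict.items_eq_map_keys r hnd [], hkeys, pv_grouped_keys,
    ← PySem.List.dedup_eq_ofList]
  apply List.map_congr_left
  intro m hm
  have hmk : m ∈ grouped.keys := by
    rw [pv_grouped_keys, ← PySem.List.dedup_eq_ofList]; exact hm
  have := pv_fold2_getD grouped.keys (by rw [← hkeys]; exact hnd) grouped m hmk
  rw [hr, this, pv_grouped_getD]
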